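-- pv_equiv track=rewrite | github.com/viniciussm07/vvtssc0524 | atividade-mcdc/placar.py | checkFull
-- ===== SOURCE A (Python) =====
-- def checkFull(dados):
-- 	assert len(dados) == 5
-- 	for kxx in dados:
-- 		assert type(kxx) == type(0)
-- 		assert 1 <= kxx <= 6
-- 	v = sorted(dados)
-- 	return (v[0] == v[1] and v[1] == v[2] and v[3] == v[4]) or \
-- 	(v[0] == v[1] and v[2] == v[3] and v[3] == v[4])
-- ===== SOURCE B (Python) =====
-- def checkFull(dados):
-- 	assert len(dados) == 5
-- 	counts = {}
-- 	for kxx in dados: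
-- 		assert type(kxx) == type(0)
-- 		assert 1 <= kxx <= 6
-- 		counts[kxx] = counts.get(kxx, 0) + 1
-- 	return all(n >= 2 for n in counts.values())
-- ===== Notes on version B (the rewrite author's own statement) =====
-- stated objective: idiomatic
-- what changed: Replaces sort-then-compare-adjacent-positions with a frequency map: build value counts in one pass and return True iff no die value occurs exactly once.
import Mathlib
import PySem

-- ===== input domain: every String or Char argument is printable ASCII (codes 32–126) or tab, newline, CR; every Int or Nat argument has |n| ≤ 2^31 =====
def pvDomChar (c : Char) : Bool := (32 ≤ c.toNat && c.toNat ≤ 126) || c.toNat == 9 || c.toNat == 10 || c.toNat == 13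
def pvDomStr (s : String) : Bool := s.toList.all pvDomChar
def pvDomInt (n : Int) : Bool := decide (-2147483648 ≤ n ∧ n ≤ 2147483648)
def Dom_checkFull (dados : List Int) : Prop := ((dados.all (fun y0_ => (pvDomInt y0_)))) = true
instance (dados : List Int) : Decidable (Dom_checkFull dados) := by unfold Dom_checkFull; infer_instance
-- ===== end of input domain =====

-- B replaces sort-and-compare-adjacent with a frequency map: full house ⇔ no die value occurs exactly once.
-- Return-value equivalence only; both versions raise AssertionError on the same inputs (excluded by Pre_).

-- ===== PORT A =====
-- v = sorted(dados); the asserts (len == 5, each die in 1..6) are Pre_checkFull.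
-- v[i] is ported as pyGetD with default 0: Pre_ guarantees length 5, so every index is in range.
def checkFull (dados : List Int) : Bool :=
  let v := PySem.List.sorted dados (fun x => x) false
  ((PySem.List.pyGetD v 0 0 == PySem.List.pyGetD v 1 0 &&
    PySem.List.pyGetD v 1 0 == PySem.List.pyGetD v 2 0 &&
    PySem.List.pyGetD v 3 0 == PySem.List.pyGetD v 4 0) ||
   (PySem.List.pyGetD v 0 0 == PySem.List.pyGetD v 1 0 &&
    PySem.List.pyGetD v 2 0 == PySem.List.pyGetD v 3 0 &&
    PySem.List.pyGetD v 3 0 == PySem.List.pyGetD v 4 0))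

-- ===== PORT B =====
-- counts[kxx] = counts.get(kxx, 0) + 1 loop, then all(n >= 2 for n in counts.values())
def checkFull_alt (dados : List Int) : Bool :=
  let counts := dados.foldl (fun d x => d.insert x (d.getD x (0 : Int) + 1)) PySem.Dict.empty
  counts.values.all (fun n => 2 ≤ n)

-- ===== PRECONDITION & SPEC =====
-- Pre_ = exactly A's asserts: five dice, each between 1 and 6 (A raises AssertionError otherwise;
-- the int-not-bool type assert is vacuous under the Int type convention).
def Pre_checkFull (dados : List Int) : Prop :=
  dados.length = 5 ∧ ∀ x ∈ dados, 1 ≤ x ∧ x ≤ 6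
instance (dados : List Int) : Decidable (Pre_checkFull dados) := by unfold Pre_checkFull; infer_instance

def pvWitness_checkFull : List Int := [2, 3, 3, 2, 3]

def Spec_checkFull (dados : List Int) (out : Bool) : Prop := out = checkFull_alt dados
instance (dados : List Int) (out : Bool) : Decidable (Spec_checkFull dados out) := by unfold Spec_checkFull; infer_instance

-- ===== CLAIM (what is proved, stated in full; the proofs are below) =====
def Claim_equal_checkFull : Prop := ∀ (dados : List Int), Dom_checkFull dados → Pre_checkFull dados → Spec_checkFull dados (checkFull dados)

-- ===== LEMMAS AND PROOFS =====

-- B computes "every die value occurs at least twice"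
lemma alt_eq_counts (xs : List Int) :
    checkFull_alt xs = decide (∀ x ∈ xs, 2 ≤ xs.count x) := by
  show (List.foldl (fun d x => d.insert x (d.getD x (0 : Int) + 1)) PySem.Dict.empty xs).values.all
    (fun n => decide (2 ≤ n)) = _
  rw [PySem.Dict.foldl_insert_getD_add_one_eq_counter]
  simp only [PySem.Dict.values, PySem.Dict.items_counter, List.map_map]
  rw [Bool.eq_iff_iff]
  simp [List.all_eq_true, PySem.Set.mem_ofList]

-- combinatorial heart: on a nondecreasing 5-list the adjacent-equality pattern
-- is exactly "no value occurs only once"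
lemma pattern_iff_counts (a b c d e : Int) (hab : a ≤ b) (hbc : b ≤ c) (hcd : c ≤ d)
    (hde : d ≤ e) :
    ((a = b ∧ b = c ∧ d = e) ∨ (a = b ∧ c = d ∧ d = e)) ↔
      (∀ x ∈ [a,b,c,d,e], 2 ≤ ([a,b,c,d,e] : List Int).count x) := by
  constructor
  · rintro (⟨rfl, rfl, rfl⟩ | ⟨rfl, rfl, rfl⟩) <;>
      · intro x hx
        simp only [List.mem_cons, List.not_mem_nil, or_false] at hx
        rcases hx with rfl | rfl | rfl | rfl | rfl <;>
          simp [List.count_cons] <;> split_ifs <;> omega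
  · intro h
    have ha := h a (by simp)
    have hc := h c (by simp)
    have he := h e (by simp)
    have h1 : a = b := by
      by_contra hne
      have hlt : a < b := lt_of_le_of_ne hab hne
      simp [show b ≠ a by omega, show c ≠ a by omega,
        show d ≠ a by omega, show e ≠ a by omega] at ha
    have h2 : d = e := by
      by_contra hne
      have hlt : d < e := lt_of_le_of_ne hde hne
      simp [show a ≠ e by omega, show b ≠ e by omega,
        show c ≠ e by omega, show d ≠ e by omega] at he
    subst h1 h2
    by_cases hac : a = c
    · exact Or.inl ⟨rfl, hac, rfl⟩
    · right
      refine ⟨rfl, ?_, rfl⟩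
      by_contra hcd'
      have hl1 : a < c := lt_of_le_of_ne hbc hac
      have hl2 : c < d := lt_of_le_of_ne hcd hcd'
      simp [show a ≠ c by omega, show d ≠ c by omega] at hc

-- ===== VERDICT (by name: the statement is the Claim_ definition above) =====
theorem checkFull_spec : Claim_equal_checkFull := by
  intro dados _ hpre
  obtain ⟨hlen, _⟩ := hpre
  unfold Spec_checkFull
  have hperm : (PySem.List.sorted dados (fun x => x) false).Perm dados :=
    PySem.List.sorted_perm dados (fun x => x) false
  have hchain : (PySem.List.sorted dados (fun x => x) false).Pairwise (fun a b => a ≤ b) :=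
    PySem.List.sorted_pairwise dados (fun x => x)
  have hvlen : (PySem.List.sorted dados (fun x => x) false).length = 5 :=
    hperm.length_eq.trans hlen
  obtain ⟨a, b, c, d, e, hv⟩ :
      ∃ a b c d e, PySem.List.sorted dados (fun x => x) false = [a, b, c, d, e] := by
    match hw : PySem.List.sorted dados (fun x => x) false, hvlen with
    | [a, b, c, d, e], _ => exact ⟨a, b, c, d, e, rfl⟩
  rw [hv] at hperm hchain
  simp only [List.pairwise_cons, List.mem_cons, List.not_mem_nil, or_false,
    List.Pairwise.nil] at hchain
  have hab : a ≤ b := hchain.1 b (by tauto)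
  have hbc : b ≤ c := hchain.2.1 c (by tauto)
  have hcd : c ≤ d := hchain.2.2.1 d (by tauto)
  have hde : d ≤ e := hchain.2.2.2.1 e (by tauto)
  show (let v := PySem.List.sorted dados (fun x => x) false;
    ((PySem.List.pyGetD v 0 0 == PySem.List.pyGetD v 1 0 &&
      PySem.List.pyGetD v 1 0 == PySem.List.pyGetD v 2 0 &&
      PySem.List.pyGetD v 3 0 == PySem.List.pyGetD v 4 0) ||
     (PySem.List.pyGetD v 0 0 == PySem.List.pyGetD v 1 0 &&
      PySem.List.pyGetD v 2 0 == PySem.List.pyGetD v 3 0 &&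
      PySem.List.pyGetD v 3 0 == PySem.List.pyGetD v 4 0))) = checkFull_alt dados
  rw [alt_eq_counts]
  simp only [hv]
  show (((a == b && b == c && d == e) || (a == b && c == d && d == e)) : Bool) = _
  rw [Bool.eq_iff_iff]
  simp only [Bool.or_eq_true, Bool.and_eq_true, beq_iff_eq, decide_eq_true_eq, and_assoc]
  rw [pattern_iff_counts a b c d e hab hbc hcd hde]
  constructor
  · intro h x hx
    rw [← hperm.count_eq x]
    exact h x (hperm.mem_iff.mpr hx)
  · intro h x hx
    rw [hperm.count_eq x]
    exact h x (hperm.mem_iff.mp hx)
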